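-- pv_equiv track=rewrite | github.com/nahowo/Algorithm-study | 프로그래머스/2/17686. ［3차］ 파일명 정렬/［3차］ 파일명 정렬.py | spliting
-- ===== SOURCE A (Python) =====
-- def spliting(fileName):
--     head = ''
--     number = 0
--     headFlag = False
--     numberFlag = False
--
--     for i in fileName:
--         if not i.isnumeric() and not headFlag:
--             head += i
--         elif i.isnumeric() and not numberFlag:
--             headFlag = True
--             tmpNumber = number * 10
--             tmpNumber += int(i)
--             if 0 <= tmpNumber <= 99999:
--                 number = tmpNumber
--             else:
--                 numberFlag = True
--         else:
--             numberFlag = True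
--
--     head = head.lower()
--     return head, number
-- ===== SOURCE B (Python) =====
-- def spliting(fileName):
--     n = len(fileName)
--     k = 0
--     while k < n and not fileName[k].isnumeric():
--         k += 1
--     head = fileName[:k].lower()
--     number = 0
--     while k < n and fileName[k].isnumeric():
--         tmp = number * 10 + int(fileName[k])
--         if tmp > 99999:
--             break
--         number = tmp
--         k += 1
--     return head, number
-- ===== Notes on version B (the rewrite author's own statement) =====
-- stated objective: simpler
-- what changed: Replaces the flag-based single loop (headFlag/numberFlag state machine) with an index pointer and two sequential while-loops: skip the non-digit prefix and slice it as the head, then accumulate the digit run with an explicit break at the 99999 cap; everything after the digit run is skipped because the index stops.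
import Mathlib
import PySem

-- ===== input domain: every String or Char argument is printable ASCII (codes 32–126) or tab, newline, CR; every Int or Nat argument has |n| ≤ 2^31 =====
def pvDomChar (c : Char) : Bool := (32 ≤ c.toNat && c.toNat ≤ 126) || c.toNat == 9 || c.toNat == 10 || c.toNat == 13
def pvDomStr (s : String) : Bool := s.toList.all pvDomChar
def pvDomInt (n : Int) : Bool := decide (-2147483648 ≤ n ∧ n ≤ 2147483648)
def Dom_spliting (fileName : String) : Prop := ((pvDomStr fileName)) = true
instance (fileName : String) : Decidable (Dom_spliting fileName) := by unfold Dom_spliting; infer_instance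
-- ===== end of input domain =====

-- B replaces A's flag-based state-machine loop with two sequential scans (skip the
-- non-digit head, then accumulate the capped digit run); objective: simpler.

-- ===== PORT A =====
-- step of A's for-loop; state = (head, number, headFlag, numberFlag).
-- i.isnumeric() on the ASCII domain is exactly PySem.Chars.isdigit, and int(i) on a
-- digit char is exactly (i.toNat : Int) - 48.
def splitingStep (s : List Char × Int × Bool × Bool) (i : Char) : List Char × Int × Bool × Bool :=
  let (head, number, headFlag, numberFlag) := s
  if !PySem.Chars.isdigit i && !headFlag then
    (head ++ [i], number, headFlag, numberFlag)
  else if PySem.Chars.isdigit i && !numberFlag then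
    let tmpNumber := number * 10 + ((i.toNat : Int) - 48)
    if 0 ≤ tmpNumber ∧ tmpNumber ≤ 99999 then
      (head, tmpNumber, true, numberFlag)
    else
      (head, number, true, true)
  else
    (head, number, headFlag, true)

def spliting (fileName : String) : String × Int :=
  let st := fileName.toList.foldl splitingStep ([], 0, false, false)
  (PySem.Str.lower (String.mk st.1), st.2.1)

-- ===== PORT B =====
-- first while-loop of B: how far the index advances over non-numeric chars
def splitingAltSkip : List Char → Nat
  | [] => 0
  | c :: cs => if !PySem.Chars.isdigit c then 1 + splitingAltSkip cs else 0

-- second while-loop of B: accumulate digits into number, break when tmp > 99999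
def splitingAltNum : List Char → Int → Int
  | [], number => number
  | c :: cs, number =>
    if PySem.Chars.isdigit c then
      let tmp := number * 10 + ((c.toNat : Int) - 48)
      if tmp > 99999 then number else splitingAltNum cs tmp
    else number

def spliting_alt (fileName : String) : String × Int :=
  let cs := fileName.toList
  let k := splitingAltSkip cs
  (PySem.Str.lower (String.mk (cs.take k)), splitingAltNum (cs.drop k) 0)

-- ===== PRECONDITION & SPEC =====
def Spec_spliting (fileName : String) (out : String × Int) : Prop := out = spliting_alt fileName
instance (fileName : String) (out : String × Int) : Decidable (Spec_spliting fileName out) := by unfold Spec_spliting; infer_instance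

-- ===== CLAIM (what is proved, stated in full; the proofs are below) =====
def Claim_equal_spliting : Prop := ∀ (fileName : String), Dom_spliting fileName → Spec_spliting fileName (spliting fileName)

-- ===== LEMMAS AND PROOFS =====

theorem spliting_digit_bounds (c : Char) (h : PySem.Chars.isdigit c = true) :
    48 ≤ c.toNat ∧ c.toNat ≤ 57 := by
  simp only [PySem.Chars.isdigit, Bool.and_eq_true, decide_eq_true_eq, Char.le_def,
    UInt32.le_iff_toNat_le] at h
  exact ⟨h.1, h.2⟩

-- the four shapes of A's step
theorem spliting_step_digit_live (head : List Char) (num : Int) (c : Char)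
    (h : PySem.Chars.isdigit c = true) :
    splitingStep (head, num, true, false) c =
      if 0 ≤ num * 10 + ((c.toNat : Int) - 48) ∧ num * 10 + ((c.toNat : Int) - 48) ≤ 99999 then
        (head, num * 10 + ((c.toNat : Int) - 48), true, false)
      else (head, num, true, true) := by
  simp [splitingStep, h]

theorem spliting_step_nondigit_live (head : List Char) (num : Int) (c : Char)
    (h : PySem.Chars.isdigit c = false) :
    splitingStep (head, num, true, false) c = (head, num, true, true) := by
  simp [splitingStep, h]

theorem spliting_step_head_digit (head : List Char) (num : Int) (c : Char)
    (h : PySem.Chars.isdigit c = true) :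
    splitingStep (head, num, false, false) c =
      if 0 ≤ num * 10 + ((c.toNat : Int) - 48) ∧ num * 10 + ((c.toNat : Int) - 48) ≤ 99999 then
        (head, num * 10 + ((c.toNat : Int) - 48), true, false)
      else (head, num, true, true) := by
  simp [splitingStep, h]

theorem spliting_step_head_nondigit (head : List Char) (num : Int) (c : Char)
    (h : PySem.Chars.isdigit c = false) :
    splitingStep (head, num, false, false) c = (head ++ [c], num, false, false) := by
  simp [splitingStep, h]

-- once both flags are set A's loop is frozen
theorem spliting_frozen (cs : List Char) (head : List Char) (num : Int) :
    cs.foldl splitingStep (head, num, true, true) = (head, num, true, true) := by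
  induction cs with
  | nil => rfl
  | cons c cs ih =>
      have e : splitingStep (head, num, true, true) c = (head, num, true, true) := by
        by_cases h : PySem.Chars.isdigit c = true
        · simp [splitingStep, h]
        · rw [Bool.not_eq_true] at h; simp [splitingStep, h]
      rw [List.foldl_cons, e, ih]

-- digit-accumulation phase: A with headFlag set matches B's second loop
theorem spliting_numPhase (cs : List Char) (head : List Char) (num : Int) (hnum : 0 ≤ num) :
    (cs.foldl splitingStep (head, num, true, false)).1 = head ∧
    (cs.foldl splitingStep (head, num, true, false)).2.1 = splitingAltNum cs num := by
  induction cs generalizing num with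
  | nil => exact ⟨rfl, rfl⟩
  | cons c cs ih =>
      by_cases h : PySem.Chars.isdigit c = true
      · have hd := spliting_digit_bounds c h
        by_cases hcap : num * 10 + ((c.toNat : Int) - 48) > 99999
        · have hno : ¬ (0 ≤ num * 10 + ((c.toNat : Int) - 48) ∧
              num * 10 + ((c.toNat : Int) - 48) ≤ 99999) := by omega
          rw [List.foldl_cons, spliting_step_digit_live head num c h, if_neg hno,
            spliting_frozen]
          refine ⟨rfl, ?_⟩
          simp only [splitingAltNum, h, if_true]
          rw [if_pos hcap]
        · have hyes : 0 ≤ num * 10 + ((c.toNat : Int) - 48) ∧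
              num * 10 + ((c.toNat : Int) - 48) ≤ 99999 := by omega
          rw [List.foldl_cons, spliting_step_digit_live head num c h, if_pos hyes]
          have hih := ih (num * 10 + ((c.toNat : Int) - 48)) (by omega)
          refine ⟨hih.1, ?_⟩
          rw [hih.2]
          simp only [splitingAltNum, h, if_true]
          rw [if_neg hcap]
      · rw [Bool.not_eq_true] at h
        rw [List.foldl_cons, spliting_step_nondigit_live head num c h, spliting_frozen]
        simp [splitingAltNum, h]

-- head phase: A's loop from the initial flags equals B's skip/take/drop decomposition
theorem spliting_headPhase (cs : List Char) (head : List Char) :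
    (cs.foldl splitingStep (head, 0, false, false)).1
        = head ++ cs.take (splitingAltSkip cs) ∧
    (cs.foldl splitingStep (head, 0, false, false)).2.1
        = splitingAltNum (cs.drop (splitingAltSkip cs)) 0 := by
  induction cs generalizing head with
  | nil => simp [splitingAltSkip, splitingAltNum]
  | cons c cs ih =>
      by_cases h : PySem.Chars.isdigit c = true
      · have hd := spliting_digit_bounds c h
        have hin : 0 ≤ (0 : Int) * 10 + ((c.toNat : Int) - 48) ∧
            (0 : Int) * 10 + ((c.toNat : Int) - 48) ≤ 99999 := by omega
        have hcap : ¬ ((0 : Int) * 10 + ((c.toNat : Int) - 48) > 99999) := by omega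
        rw [List.foldl_cons, spliting_step_head_digit head 0 c h, if_pos hin]
        have hnp := spliting_numPhase cs head ((0 : Int) * 10 + ((c.toNat : Int) - 48)) (by omega)
        have hskip : splitingAltSkip (c :: cs) = 0 := by simp [splitingAltSkip, h]
        refine ⟨by rw [hnp.1, hskip]; simp, ?_⟩
        rw [hnp.2, hskip, List.drop_zero]
        simp only [splitingAltNum, h, if_true]
        rw [if_neg hcap]
      · rw [Bool.not_eq_true] at h
        rw [List.foldl_cons, spliting_step_head_nondigit head 0 c h]
        have hih := ih (head ++ [c])
        have hskip : splitingAltSkip (c :: cs) = 1 + splitingAltSkip cs := by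
          simp [splitingAltSkip, h]
        refine ⟨?_, ?_⟩
        · rw [hih.1, hskip, Nat.add_comm, List.take_succ_cons, List.append_assoc,
            List.singleton_append]
        · rw [hih.2, hskip, Nat.add_comm, List.drop_succ_cons]

-- ===== VERDICT (by name: the statement is the Claim_ definition above) =====
theorem spliting_spec : Claim_equal_spliting := by
  intro fileName _
  unfold Spec_spliting spliting spliting_alt
  have h := spliting_headPhase fileName.toList []
  simp only [List.nil_append] at h
  simp [h.1, h.2]
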